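-- pv_equiv track=rewrite | github.com/Iqbalahmed7/littlejoys-persona-engine1 | app/streamlit_app.py | _pre_cluster_reasons
-- ===== SOURCE A (Python) =====
-- def _pre_cluster_reasons(raw: dict[str, int]) -> dict[str, int]:
--     """Python-only prefix clustering — collapses obvious snake_case variants before LLM.
--
--     Groups entries that share the same first 3 significant words (after normalising
--     snake_case → space-separated). Keeps the shortest label per cluster.
--     This handles the common case where the LLM emits e.g.
--       no_discount_this_time / no_discount_this_time_slight_hesitation /
--       no_discount_this_time_slightly_disappointing  →  all become one entry.
--     """
--     from collections import defaultdict
--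
--     def _sig_words(s: str, n: int = 3) -> str:
--         tokens = s.lower().replace("_", " ").split()
--         # Skip filler tokens so "a_bit_expensive" and "slightly_expensive" share "expensive"
--         _skip = {"a", "an", "the", "this", "that", "slightly", "slight", "bit", "little",
--                  "very", "quite", "some", "somewhat", "but", "not", "is", "its", "of"}
--         sig = [t for t in tokens if t not in _skip]
--         return " ".join(sig[:n])
--
--     clusters: dict[str, int] = defaultdict(int)      # prefix_key → total count
--     labels: dict[str, str] = {}                       # prefix_key → best label
--
--     for key, count in raw.items():
--         pk = _sig_words(key)
--         clusters[pk] += count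
--         # Prefer the shortest / cleanest label (no trailing qualifier noise)
--         if pk not in labels or len(key) < len(labels[pk]):
--             labels[pk] = key
--
--     return {labels[pk]: count for pk, count in clusters.items()}
-- ===== SOURCE B (Python) =====
-- def _pre_cluster_reasons(raw: dict[str, int]) -> dict[str, int]:
--     """Group-then-reduce variant: materialise buckets keyed by the significant-word
--     prefix, then reduce each bucket to (shortest label, total count)."""
--     from collections import defaultdict
--
--     _skip = {"a", "an", "the", "this", "that", "slightly", "slight", "bit", "little",
--              "very", "quite", "some", "somewhat", "but", "not", "is", "its", "of"}
--
--     def _sig_words(s: str, n: int = 3) -> str: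
--         sig = [t for t in s.lower().replace("_", " ").split() if t not in _skip]
--         return " ".join(sig[:n])
--
--     buckets: dict[str, list[tuple[str, int]]] = defaultdict(list)
--     for key, count in raw.items():
--         buckets[_sig_words(key)].append((key, count))
--
--     return {min((k for k, _ in b), key=len): sum(c for _, c in b)
--             for b in buckets.values()}
-- ===== Notes on version B (the rewrite author's own statement) =====
-- stated objective: alternative
-- what changed: A maintains two running accumulator dicts (cluster total and current shortest label) updated per entry; B materialises a bucket index mapping each signature key to its list of (key, count) entries in one pass and then reduces every bucket with min(key=len) and sum.
import Mathlib
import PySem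

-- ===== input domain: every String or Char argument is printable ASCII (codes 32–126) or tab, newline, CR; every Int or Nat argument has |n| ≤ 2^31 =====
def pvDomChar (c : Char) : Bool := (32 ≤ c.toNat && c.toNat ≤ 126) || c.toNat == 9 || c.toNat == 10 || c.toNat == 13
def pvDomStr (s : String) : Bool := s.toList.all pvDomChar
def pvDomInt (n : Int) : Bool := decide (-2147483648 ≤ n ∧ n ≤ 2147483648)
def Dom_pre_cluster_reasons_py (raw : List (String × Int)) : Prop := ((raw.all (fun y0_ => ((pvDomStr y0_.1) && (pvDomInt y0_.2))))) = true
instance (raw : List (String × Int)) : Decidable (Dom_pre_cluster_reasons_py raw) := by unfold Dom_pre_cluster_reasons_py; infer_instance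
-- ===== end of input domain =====

-- B replaces A's running count/shortest-label accumulator dicts by a materialised
-- bucket index (sig-key → list of entries) reduced afterwards with min/sum (objective: alternative).


-- ===== PORT A =====
-- the filler-token set of the inner helper _sig_words (identical in A and B)
def pvSkip : List String :=
  ["a", "an", "the", "this", "that", "slightly", "slight", "bit", "little",
   "very", "quite", "some", "somewhat", "but", "not", "is", "its", "of"]

-- _sig_words (the inner helper, textually identical in A and in B)
def pvSigWords (s : String) : String :=
  let tokens := PySem.Str.split₀ (PySem.Str.replace (PySem.Str.lower s) "_" " ")
  let sig := tokens.filter (fun t => !(pvSkip.contains t))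
  PySem.Str.join " " (PySem.List.slice sig none (some 3))

def pre_cluster_reasons_py (raw : List (String × Int)) : List (String × Int) :=
  let st := raw.foldl
    (fun (st : PySem.Dict String Int × PySem.Dict String String) kv =>
      let pk := pvSigWords kv.1
      ( st.1.insert pk (st.1.getD pk 0 + kv.2),
        -- 'pk not in labels or len(key) < len(labels[pk])'; labels[pk] is only read
        -- when pk is present (short-circuit or), so the getD default is never used
        if !st.2.contains pk || PySem.Str.len kv.1 < PySem.Str.len (st.2.getD pk "") then
          st.2.insert pk kv.1
        else st.2 ))
    (PySem.Dict.empty, PySem.Dict.empty)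
  -- labels[pk]: pk is always a key of labels here (set when pk was first seen), so
  -- the .getD "" default is never used
  (st.1.items.foldl
    (fun (d : PySem.Dict String Int) pc => d.insert ((st.2.get? pc.1).getD "") pc.2)
    PySem.Dict.empty).items

-- ===== PORT B =====
def pre_cluster_reasons_py_alt (raw : List (String × Int)) : List (String × Int) :=
  let buckets := raw.foldl
    (fun (d : PySem.Dict String (List (String × Int))) kv =>
      d.modify (pvSigWords kv.1) [] (fun b => b ++ [kv]))
    PySem.Dict.empty
  -- min(..., key=len): every bucket received at least one append, so min? is some
  -- and the .getD "" default is never used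
  (buckets.items.foldl
    (fun (d : PySem.Dict String Int) pb =>
      d.insert ((PySem.List.min? (pb.2.map (·.1)) PySem.Str.len).getD "")
        ((pb.2.map (·.2)).sum))
    PySem.Dict.empty).items

-- ===== PRECONDITION & SPEC =====
-- Pre_ excludes association lists with duplicate keys: the Python argument is a dict,
-- which cannot contain them, so such lists represent no input A is ever given.
def Pre_pre_cluster_reasons_py (raw : List (String × Int)) : Prop :=
  (raw.map Prod.fst).Nodup
instance (raw : List (String × Int)) : Decidable (Pre_pre_cluster_reasons_py raw) := by
  unfold Pre_pre_cluster_reasons_py; infer_instance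

def pvWitness_pre_cluster_reasons_py : (List (String × Int)) :=
  [("no_discount_this_time", 2), ("no_discount_this_time_slight_hesitation", 1), ("price", 1)]

def Spec_pre_cluster_reasons_py (raw : List (String × Int)) (out : List (String × Int)) : Prop := out = pre_cluster_reasons_py_alt raw
instance (raw : List (String × Int)) (out : List (String × Int)) : Decidable (Spec_pre_cluster_reasons_py raw out) := by unfold Spec_pre_cluster_reasons_py; infer_instance

-- ===== CLAIM (what is proved, stated in full; the proofs are below) =====
def Claim_equal_pre_cluster_reasons_py : Prop := ∀ (raw : List (String × Int)), Dom_pre_cluster_reasons_py raw → Pre_pre_cluster_reasons_py raw → Spec_pre_cluster_reasons_py raw (pre_cluster_reasons_py raw)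

-- ===== LEMMAS AND PROOFS =====

-- A's two loop accumulators, as named step functions
def pvStepC (d : PySem.Dict String Int) (kv : String × Int) : PySem.Dict String Int :=
  d.insert (pvSigWords kv.1) (d.getD (pvSigWords kv.1) 0 + kv.2)

def pvStepL (d : PySem.Dict String String) (kv : String × Int) : PySem.Dict String String :=
  if !d.contains (pvSigWords kv.1) || PySem.Str.len kv.1 < PySem.Str.len (d.getD (pvSigWords kv.1) "") then
    d.insert (pvSigWords kv.1) kv.1
  else d

-- the group of entries whose signature is pk
def pvGrp (raw : List (String × Int)) (pk : String) : List (String × Int) :=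
  raw.filter (fun kv => pvSigWords kv.1 == pk)

def pvLabelOf (raw : List (String × Int)) (pk : String) : String :=
  (PySem.List.min? ((pvGrp raw pk).map (·.1)) PySem.Str.len).getD ""

lemma pv_pair_split (l : List (String × Int)) (c : PySem.Dict String Int)
    (lb : PySem.Dict String String) :
    l.foldl (fun st kv => (pvStepC st.1 kv, pvStepL st.2 kv)) (c, lb)
      = (l.foldl pvStepC c, l.foldl pvStepL lb) := by
  induction l generalizing c lb with
  | nil => rfl
  | cons kv t ih => simpa [List.foldl] using ih (pvStepC c kv) (pvStepL lb kv)

lemma pv_clusters_getD (l : List (String × Int)) (d : PySem.Dict String Int) (pk : String) :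
    (l.foldl pvStepC d).getD pk 0 = d.getD pk 0 + ((pvGrp l pk).map (·.2)).sum := by
  induction l generalizing d with
  | nil => simp [pvGrp]
  | cons kv t ih =>
    simp only [List.foldl, pvGrp, List.filter]
    by_cases h : pvSigWords kv.1 = pk
    · simp only [h, beq_self_eq_true]
      rw [show (t.foldl pvStepC (pvStepC d kv)).getD pk 0 = _ from ih _]
      simp [pvStepC, h, PySem.Dict.getD_insert_self, pvGrp]
      ring
    · have hb : (pvSigWords kv.1 == pk) = false := by simpa using h
      simp only [hb]
      rw [show (t.foldl pvStepC (pvStepC d kv)).getD pk 0 = _ from ih _]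
      simp [pvStepC, PySem.Dict.getD_insert_of_ne d _ _ (Ne.symm h), pvGrp]

lemma pv_labels_get? (l : List (String × Int)) (d : PySem.Dict String String) (pk : String) :
    (l.foldl pvStepL d).get? pk
      = ((pvGrp l pk).map (·.1)).foldl
          (fun acc x => match acc with
            | none => some x
            | some m => if PySem.Str.len x < PySem.Str.len m then some x else some m)
          (d.get? pk) := by
  induction l generalizing d with
  | nil => simp [pvGrp]
  | cons kv t ih =>
    simp only [List.foldl, pvGrp, List.filter]
    by_cases h : pvSigWords kv.1 = pk
    · simp only [h, beq_self_eq_true]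
      rw [ih (pvStepL d kv)]
      have hstep : (pvStepL d kv).get? pk
          = (match d.get? pk with
             | none => some kv.1
             | some m => if PySem.Str.len kv.1 < PySem.Str.len m then some kv.1 else some m) := by
        unfold pvStepL
        rw [h, PySem.Dict.contains_eq_isSome_get?, PySem.Dict.getD_eq_get?_getD]
        cases hd : d.get? pk with
        | none => simp [PySem.Dict.get?_insert_self]
        | some m =>
          simp only [Option.isSome_some, Bool.not_true, Bool.false_or, Option.getD_some]
          by_cases hlt : kv.1.length < m.length
          · simp [hlt, PySem.Dict.get?_insert_self]
          · simp [hlt, hd]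
      rw [hstep]
      simp [pvGrp]
    · have hb : (pvSigWords kv.1 == pk) = false := by simpa using h
      simp only [hb]
      rw [ih (pvStepL d kv)]
      have hstep : (pvStepL d kv).get? pk = d.get? pk := by
        unfold pvStepL
        split_ifs
        · exact PySem.Dict.get?_insert_of_ne d _ (Ne.symm h)
        · rfl
      rw [hstep]
      simp [pvGrp]

lemma pv_labels_min (l : List (String × Int)) (pk : String) :
    (l.foldl pvStepL PySem.Dict.empty).get? pk
      = PySem.List.min? ((pvGrp l pk).map (·.1)) PySem.Str.len := by
  rw [pv_labels_get?, PySem.Dict.get?_empty]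
  unfold PySem.List.min?
  congr 1
  funext acc x
  cases acc <;> rfl

lemma pv_buckets_getD (raw : List (String × Int)) (pk : String) :
    (raw.foldl
      (fun (d : PySem.Dict String (List (String × Int))) kv =>
        d.modify (pvSigWords kv.1) [] (fun b => b ++ [kv])) PySem.Dict.empty).getD pk []
      = pvGrp raw pk := by
  have hmap : raw.foldl
      (fun (d : PySem.Dict String (List (String × Int))) kv =>
        d.modify (pvSigWords kv.1) [] (fun b => b ++ [kv])) PySem.Dict.empty
      = (raw.map (fun kv => (pvSigWords kv.1, kv))).foldl
          (fun d p => d.modify p.1 [] (fun b => b ++ [p.2])) PySem.Dict.empty := by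
    rw [List.foldl_map]
  rw [hmap, PySem.Dict.getD_foldl_modify_append]
  simp [List.filter_map, Function.comp_def, pvGrp, PySem.Dict.getD_empty]

lemma pv_min?_aux {α κ : Type} [LT κ] [DecidableLT κ] (key : α → κ) (t : List α) (m : α) :
    t.foldl (fun acc x => match acc with
      | none => some x
      | some m => if key x < key m then some x else some m) (some m) ≠ none := by
  induction t generalizing m with
  | nil => simp
  | cons b t ih =>
    simp only [List.foldl_cons]
    by_cases h : key b < key m <;> simp [h, ih]

lemma pv_min?_ne_none {α κ : Type} [LT κ] [DecidableLT κ] (key : α → κ) (a : α) (t : List α) :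
    PySem.List.min? (a :: t) key ≠ none := by
  unfold PySem.List.min?
  simpa using pv_min?_aux key t a

lemma pv_sig_of_mem_grp (raw : List (String × Int)) (pk x : String)
    (hx : x ∈ (pvGrp raw pk).map (·.1)) : pvSigWords x = pk := by
  rcases List.mem_map.1 hx with ⟨kv, hkv, rfl⟩
  exact by simpa using (List.mem_filter.1 hkv).2

lemma pv_sig_labelOf (raw : List (String × Int)) (pk : String)
    (h : pk ∈ raw.map (fun kv => pvSigWords kv.1)) :
    pvSigWords (pvLabelOf raw pk) = pk := by
  rcases List.mem_map.1 h with ⟨kv, hkv, hs⟩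
  have hmem : kv.1 ∈ (pvGrp raw pk).map (·.1) :=
    List.mem_map.2 ⟨kv, List.mem_filter.2 ⟨hkv, by simpa using hs⟩, rfl⟩
  cases hmin : PySem.List.min? ((pvGrp raw pk).map (·.1)) PySem.Str.len with
  | none =>
    exfalso
    cases hg : (pvGrp raw pk).map (·.1) with
    | nil => rw [hg] at hmem; exact absurd hmem (List.not_mem_nil)
    | cons a t => rw [hg] at hmin; exact pv_min?_ne_none PySem.Str.len a t hmin
  | some m =>
    have : m ∈ (pvGrp raw pk).map (·.1) := PySem.List.min?_mem hmin
    simpa [pvLabelOf, hmin] using pv_sig_of_mem_grp raw pk m this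

-- the ordered list of distinct signature keys
def pvK (raw : List (String × Int)) : List String :=
  PySem.Set.update ([] : PySem.Set String) (raw.map (fun kv => pvSigWords kv.1))

lemma pv_mem_K (raw : List (String × Int)) (pk : String) (h : pk ∈ pvK raw) :
    pk ∈ raw.map (fun kv => pvSigWords kv.1) := by
  rcases (PySem.Set.mem_update _ _ _).1 h with h' | h'
  · exact absurd h' (List.not_mem_nil)
  · exact h'

lemma pv_nodup_labels (raw : List (String × Int)) (hK : (pvK raw).Nodup) :
    ((pvK raw).map (pvLabelOf raw)).Nodup := by
  refine List.Nodup.map_on ?_ hK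
  intro x hx y hy hxy
  have hx' := pv_sig_labelOf raw x (pv_mem_K raw x hx)
  have hy' := pv_sig_labelOf raw y (pv_mem_K raw y hy)
  rw [← hx', ← hy', hxy]

lemma pv_final_items {ν : Type} (l : List (String × ν)) (k : String × ν → String)
    (v : String × ν → Int) (hnd : (l.map k).Nodup) :
    (l.foldl (fun (d : PySem.Dict String Int) p => d.insert (k p) (v p)) PySem.Dict.empty).items
      = l.map (fun p => (k p, v p)) := by
  have := PySem.Dict.items_foldl_insert_fresh l k v PySem.Dict.empty
    (fun a _ => PySem.Dict.contains_empty (k a)) hnd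
  simpa using this

-- ===== VERDICT (by name: the statement is the Claim_ definition above) =====
theorem pre_cluster_reasons_py_spec : Claim_equal_pre_cluster_reasons_py := by
  intro raw _ _
  unfold Spec_pre_cluster_reasons_py
  -- names for A's two accumulators, B's bucket index and the shared key order
  set C := raw.foldl pvStepC PySem.Dict.empty with hC
  set L := raw.foldl pvStepL PySem.Dict.empty with hL
  set Bk := raw.foldl
    (fun (d : PySem.Dict String (List (String × Int))) kv =>
      d.modify (pvSigWords kv.1) [] (fun b => b ++ [kv])) PySem.Dict.empty with hBk
  -- keys of both dicts are the distinct signature keys in first-seen order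
  have hCkeys : C.keys = pvK raw :=
    PySem.Dict.keys_foldl_insert_key raw (fun kv => pvSigWords kv.1)
      (fun d kv => d.getD (pvSigWords kv.1) 0 + kv.2) PySem.Dict.empty
  have hBkeys : Bk.keys = pvK raw :=
    PySem.Dict.keys_foldl_modify_key raw (fun kv => pvSigWords kv.1) []
      (fun _ kv b => b ++ [kv]) PySem.Dict.empty
  have hCnd : C.keys.Nodup :=
    PySem.Dict.nodup_keys_foldl_insert_key raw (fun kv => pvSigWords kv.1)
      (fun d kv => d.getD (pvSigWords kv.1) 0 + kv.2) PySem.Dict.empty List.nodup_nil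
  have hBnd : Bk.keys.Nodup :=
    PySem.Dict.nodup_keys_foldl_modify_key raw (fun kv => pvSigWords kv.1) []
      (fun _ kv b => b ++ [kv]) PySem.Dict.empty List.nodup_nil
  have hKnd : (pvK raw).Nodup := hCkeys ▸ hCnd
  have hlbl : ((pvK raw).map (pvLabelOf raw)).Nodup := pv_nodup_labels raw hKnd
  -- items of the two dicts
  have hCitems : C.items = (pvK raw).map (fun pk => (pk, ((pvGrp raw pk).map (·.2)).sum)) := by
    rw [PySem.Dict.items_eq_map_keys C hCnd 0, hCkeys]
    refine List.map_congr_left fun pk _ => ?_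
    rw [hC, pv_clusters_getD, PySem.Dict.getD_empty, zero_add]
  have hBitems : Bk.items = (pvK raw).map (fun pk => (pk, pvGrp raw pk)) := by
    rw [PySem.Dict.items_eq_map_keys Bk hBnd [], hBkeys]
    refine List.map_congr_left fun pk _ => ?_
    rw [hBk, pv_buckets_getD]
  -- A's result
  have hA : pre_cluster_reasons_py raw
      = C.items.map (fun pc => ((L.get? pc.1).getD "", pc.2)) := by
    have hrfl : pre_cluster_reasons_py raw
        = ((raw.foldl (fun st kv => (pvStepC st.1 kv, pvStepL st.2 kv))
            (PySem.Dict.empty, PySem.Dict.empty)).1.items.foldl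
            (fun (d : PySem.Dict String Int) pc =>
              d.insert (((raw.foldl (fun st kv => (pvStepC st.1 kv, pvStepL st.2 kv))
                (PySem.Dict.empty, PySem.Dict.empty)).2.get? pc.1).getD "") pc.2)
            PySem.Dict.empty).items := rfl
    rw [hrfl, pv_pair_split]
    refine pv_final_items C.items (fun pc => (L.get? pc.1).getD "") (fun pc => pc.2) ?_
    rw [hCitems, List.map_map]
    have : ((fun pc : String × Int => (L.get? pc.1).getD "") ∘
        fun pk => (pk, ((pvGrp raw pk).map (·.2)).sum)) = pvLabelOf raw := by
      funext pk
      show (L.get? pk).getD "" = pvLabelOf raw pk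
      rw [hL, pv_labels_min]; rfl
    rw [this]; exact hlbl
  -- B's result
  have hB : pre_cluster_reasons_py_alt raw
      = Bk.items.map (fun pb =>
          ((PySem.List.min? (pb.2.map (·.1)) PySem.Str.len).getD "", (pb.2.map (·.2)).sum)) := by
    refine pv_final_items Bk.items
      (fun pb => (PySem.List.min? (pb.2.map (·.1)) PySem.Str.len).getD "")
      (fun pb => (pb.2.map (·.2)).sum) ?_
    rw [hBitems, List.map_map]
    have : ((fun pb : String × List (String × Int) =>
        (PySem.List.min? (pb.2.map (·.1)) PySem.Str.len).getD "") ∘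
        fun pk => (pk, pvGrp raw pk)) = pvLabelOf raw := by
      funext pk; rfl
    rw [this]; exact hlbl
  rw [hA, hB, hCitems, hBitems, List.map_map, List.map_map]
  refine List.map_congr_left fun pk _ => ?_
  show ((L.get? pk).getD "", ((pvGrp raw pk).map (·.2)).sum)
      = ((PySem.List.min? ((pvGrp raw pk).map (·.1)) PySem.Str.len).getD "",
         ((pvGrp raw pk).map (·.2)).sum)
  rw [hL, pv_labels_min]
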